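-- pv_equiv track=rewrite | github.com/OfirGiladBGU/PointDistributions | optimized_ccvt/fast_ccvt.py | SelectSitePairClustersCachedStage
-- ===== SOURCE A (Python) =====
-- from typing import List, Tuple, Optional
--
-- Pair = Tuple[int, int]
--
-- Cluster = List[Pair]
--
-- def SelectSitePairClustersCachedStage(S, Υinit: List[Pair]) -> List[Cluster]:
--     Υb: List[Cluster] = []
--     clusters_sites: List[set] = []
--
--     for (si, sj) in Υinit:
--         added = False
--         # foreach Υ ∈ Υb in increasing size
--         for idx in sorted(range(len(Υb)), key=lambda t: len(Υb[t])):
--             used = clusters_sites[idx]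
--             # if neither si nor sj belongs to any pair ∈ Υ  // no conflict
--             if (si not in used) and (sj not in used):
--                 Υb[idx].append((si, sj))          # Υ ← Υ ∪ (s_i, s_j)
--                 used.update([si, sj])
--                 added = True
--                 break
--         # if not added  // conflict with all existing clusters
--         if not added:
--             Υb.append([(si, sj)])                  # start a new cluster
--             clusters_sites.append({si, sj})
--     return Υb
-- ===== SOURCE B (Python) =====
-- from typing import List, Tuple
--
-- Pair = Tuple[int, int]
-- Cluster = List[Pair]
--
-- def SelectSitePairClustersCachedStage(S, Υinit: List[Pair]) -> List[Cluster]: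
--     clusters: List[Cluster] = []
--     sites: List[set] = []
--     for (si, sj) in Υinit:
--         best_idx = None
--         best_size = 0
--         for idx in range(len(clusters)):
--             used = sites[idx]
--             if si not in used and sj not in used:
--                 size = len(clusters[idx])
--                 if best_idx is None or size < best_size:
--                     best_idx = idx
--                     best_size = size
--         if best_idx is None:
--             clusters.append([(si, sj)])
--             sites.append({si, sj})
--         else:
--             clusters[best_idx].append((si, sj))
--             sites[best_idx].update((si, sj))
--     return clusters
-- ===== Notes on version B (the rewrite author's own statement) =====
-- stated objective: faster
-- what changed: Replaces A's per-pair stable sort of all cluster indices by size (then first-fit scan) with a single linear scan that tracks the best conflict-free cluster (minimum size, lowest index on ties via strict <).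
import Mathlib
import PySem

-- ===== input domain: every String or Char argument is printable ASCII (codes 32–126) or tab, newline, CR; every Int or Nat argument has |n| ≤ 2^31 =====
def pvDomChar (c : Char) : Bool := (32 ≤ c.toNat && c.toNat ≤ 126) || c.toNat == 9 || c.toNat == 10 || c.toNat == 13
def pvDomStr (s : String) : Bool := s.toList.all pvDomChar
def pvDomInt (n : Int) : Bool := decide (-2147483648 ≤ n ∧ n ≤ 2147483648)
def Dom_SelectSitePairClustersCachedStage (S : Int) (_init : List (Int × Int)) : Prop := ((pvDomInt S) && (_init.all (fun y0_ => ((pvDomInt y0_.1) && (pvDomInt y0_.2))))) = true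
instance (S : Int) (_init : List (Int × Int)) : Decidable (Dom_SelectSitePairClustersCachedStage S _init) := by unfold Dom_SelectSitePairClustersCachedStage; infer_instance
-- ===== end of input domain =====

-- B replaces A's per-pair stable sort of cluster indices by size with a single linear
-- best-(size,index) scan over the clusters (objective: faster, constant-factor).

-- ===== PORT A =====
-- inner 'for idx in sorted(...)' loop: first conflict-free cluster gets the pair; none → not added
def pvLoopA (si sj : Int) (yb : List (List (Int × Int))) (sites : List (PySem.Set Int)) :
    List Nat → Option (List (List (Int × Int)) × List (PySem.Set Int))
  | [] => none
  | idx :: rest =>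
    let used := sites.getD idx PySem.Set.empty
    if (!(PySem.Set.contains used si) && !(PySem.Set.contains used sj)) = true then
      some (yb.set idx (yb.getD idx [] ++ [(si, sj)]),
            sites.set idx (PySem.Set.update used [si, sj]))
    else pvLoopA si sj yb sites rest

-- one iteration of A's outer loop over Υinit
def pvStepA (st : List (List (Int × Int)) × List (PySem.Set Int)) (p : Int × Int) :
    List (List (Int × Int)) × List (PySem.Set Int) :=
  let yb := st.1
  let sites := st.2
  let order := PySem.List.sorted (List.range yb.length) (fun t => (yb.getD t []).length) false
  match pvLoopA p.1 p.2 yb sites order with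
  | some st' => st'
  | none => (yb ++ [[(p.1, p.2)]], sites ++ [PySem.Set.ofList [p.1, p.2]])

def SelectSitePairClustersCachedStage (S : Int) (_init : List (Int × Int)) :
    List (List (Int × Int)) :=
  (_init.foldl pvStepA ([], [])).1

-- ===== PORT B =====
-- single scan: best (lowest-size, then lowest-index) conflict-free cluster, as (idx, size)
def pvScanB (si sj : Int) (clusters : List (List (Int × Int))) (sites : List (PySem.Set Int)) :
    Option (Nat × Nat) :=
  (List.range clusters.length).foldl
    (fun best idx =>
      let used := sites.getD idx PySem.Set.empty
      if (!(PySem.Set.contains used si) && !(PySem.Set.contains used sj)) = true then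
        let size := (clusters.getD idx []).length
        match best with
        | none => some (idx, size)
        | some (bi, bs) => if size < bs then some (idx, size) else some (bi, bs)
      else best)
    none

-- one iteration of B's outer loop
def pvStepB (st : List (List (Int × Int)) × List (PySem.Set Int)) (p : Int × Int) :
    List (List (Int × Int)) × List (PySem.Set Int) :=
  let clusters := st.1
  let sites := st.2
  match pvScanB p.1 p.2 clusters sites with
  | none => (clusters ++ [[(p.1, p.2)]], sites ++ [PySem.Set.ofList [p.1, p.2]])
  | some (bi, _) =>
      (clusters.set bi (clusters.getD bi [] ++ [(p.1, p.2)]),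
       sites.set bi (PySem.Set.update (sites.getD bi PySem.Set.empty) [p.1, p.2]))

def SelectSitePairClustersCachedStage_alt (S : Int) (_init : List (Int × Int)) :
    List (List (Int × Int)) :=
  (_init.foldl pvStepB ([], [])).1

-- ===== PRECONDITION & SPEC =====
def Spec_SelectSitePairClustersCachedStage (S : Int) (_init : List (Int × Int)) (out : List (List (Int × Int))) : Prop := out = SelectSitePairClustersCachedStage_alt S _init
instance (S : Int) (_init : List (Int × Int)) (out : List (List (Int × Int))) : Decidable (Spec_SelectSitePairClustersCachedStage S _init out) := by unfold Spec_SelectSitePairClustersCachedStage; infer_instance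

-- ===== CLAIM (what is proved, stated in full; the proofs are below) =====
def Claim_equal_SelectSitePairClustersCachedStage : Prop := ∀ (S : Int) (_init : List (Int × Int)), Dom_SelectSitePairClustersCachedStage S _init → Spec_SelectSitePairClustersCachedStage S _init (SelectSitePairClustersCachedStage S _init)

-- ===== LEMMAS AND PROOFS =====

-- the "stable-by-size" order on cluster indices: smaller size first, ties by index
def pvLex (key : Nat → Nat) (a b : Nat) : Prop :=
  key a < key b ∨ (key a = key b ∧ a < b)

theorem pvLex_asymm {key : Nat → Nat} {a b : Nat} (h1 : pvLex key a b) (h2 : pvLex key b a) : False := by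
  unfold pvLex at h1 h2; omega

theorem pvInsertBy_perm {α : Type} (bef : α → α → Bool) (x : α) (ys : List α) :
    (PySem.List.insertBy bef x ys).Perm (x :: ys) := by
  induction ys with
  | nil => simp [PySem.List.insertBy]
  | cons y ys ih =>
    simp only [PySem.List.insertBy]
    split
    · exact List.Perm.refl _
    · exact (List.Perm.cons y ih).trans (List.Perm.swap x y ys)

theorem pvInsertBy_pairwise (key : Nat → Nat) (x : Nat) (ys : List Nat)
    (hp : ys.Pairwise (pvLex key)) (hlt : ∀ y ∈ ys, y < x) :
    (PySem.List.insertBy (fun a b => decide (key a < key b)) x ys).Pairwise (pvLex key) := by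
  induction ys with
  | nil => simp [PySem.List.insertBy, pvLex]
  | cons y ys ih =>
    simp only [PySem.List.insertBy]
    rw [List.pairwise_cons] at hp
    split
    · rename_i hb
      simp only [decide_eq_true_eq] at hb
      refine List.Pairwise.cons ?_ (List.Pairwise.cons hp.1 hp.2)
      intro z hz
      rcases List.mem_cons.mp hz with rfl | hz'
      · exact Or.inl hb
      · have := hp.1 z hz'
        unfold pvLex at this ⊢
        omega
    · rename_i hb
      simp only [decide_eq_true_eq] at hb
      refine List.Pairwise.cons ?_ (ih hp.2 (fun a ha => hlt a (List.mem_cons_of_mem _ ha)))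
      intro z hz
      have hz2 : z = x ∨ z ∈ ys :=
        List.mem_cons.mp ((pvInsertBy_perm (fun a b => decide (key a < key b)) x ys).mem_iff.mp hz)
      cases hz2 with
      | inl h =>
        subst h
        have hyx : y < z := hlt y (by simp)
        unfold pvLex; omega
      | inr h => exact hp.1 z h

theorem pvFoldl_insert_pairwise (key : Nat → Nat) (xs acc : List Nat)
    (hx : xs.Pairwise (· < ·)) (hacc : acc.Pairwise (pvLex key))
    (hsep : ∀ a ∈ acc, ∀ x ∈ xs, a < x) :
    (xs.foldl (fun acc x => PySem.List.insertBy (fun a b => decide (key a < key b)) x acc) acc).Pairwise (pvLex key) ∧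
    ∀ a ∈ (xs.foldl (fun acc x => PySem.List.insertBy (fun a b => decide (key a < key b)) x acc) acc), a ∈ acc ∨ a ∈ xs := by
  induction xs generalizing acc with
  | nil => exact ⟨hacc, fun a ha => Or.inl ha⟩
  | cons x xs ih =>
    rw [List.pairwise_cons] at hx
    simp only [List.foldl_cons]
    have hacc' : (PySem.List.insertBy (fun a b => decide (key a < key b)) x acc).Pairwise (pvLex key) :=
      pvInsertBy_pairwise key x acc hacc (fun y hy => hsep y hy x List.mem_cons_self)
    have hmem : ∀ a ∈ PySem.List.insertBy (fun a b => decide (key a < key b)) x acc, a = x ∨ a ∈ acc := by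
      intro a ha
      exact List.mem_cons.mp ((pvInsertBy_perm _ x acc).mem_iff.mp ha)
    have hsep' : ∀ a ∈ PySem.List.insertBy (fun a b => decide (key a < key b)) x acc, ∀ z ∈ xs, a < z := by
      intro a ha z hz
      rcases hmem a ha with rfl | ha'
      · exact hx.1 z hz
      · exact lt_trans (hsep a ha' x List.mem_cons_self) (hx.1 z hz)
    obtain ⟨h1, h2⟩ := ih _ hx.2 hacc' hsep'
    refine ⟨h1, fun a ha => ?_⟩
    rcases h2 a ha with ha' | ha'
    · rcases hmem a ha' with rfl | h
      · exact Or.inr List.mem_cons_self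
      · exact Or.inl h
    · exact Or.inr (List.mem_cons_of_mem _ ha')

theorem pvSorted_range_pairwise (key : Nat → Nat) (n : Nat) :
    (PySem.List.sorted (List.range n) key false).Pairwise (pvLex key) := by
  rw [PySem.List.sorted_eq_foldl_insertBy]
  exact (pvFoldl_insert_pairwise key (List.range n) [] (List.pairwise_lt_range)
    (List.Pairwise.nil) (by simp)).1

-- A's chosen index: first P-satisfying element of the stable sort, characterized as lex-minimum
theorem pvFind_min (key : Nat → Nat) (P : Nat → Bool) (l : List Nat)
    (hp : l.Pairwise (pvLex key)) {i : Nat} (h : l.find? P = some i) :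
    P i = true ∧ ∀ j ∈ l, P j = true → j ≠ i → pvLex key i j := by
  induction l with
  | nil => simp at h
  | cons x l ih =>
    rw [List.pairwise_cons] at hp
    rw [List.find?_cons] at h
    split at h
    · rename_i hPx
      cases h
      refine ⟨hPx, fun j hj hPj hne => ?_⟩
      rcases List.mem_cons.mp hj with rfl | hj'
      · exact absurd rfl hne
      · exact hp.1 j hj'
    · rename_i hPx
      obtain ⟨h1, h2⟩ := ih hp.2 h
      refine ⟨h1, fun j hj hPj hne => ?_⟩
      rcases List.mem_cons.mp hj with rfl | hj'
      · simp_all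
      · exact h2 j hj' hPj hne

-- B's scan, abstracted: fold tracking the best (index, size)
def pvScanGen (key : Nat → Nat) (P : Nat → Bool) (xs : List Nat) : Option (Nat × Nat) :=
  xs.foldl
    (fun best idx =>
      if P idx = true then
        match best with
        | none => some (idx, key idx)
        | some (bi, bs) => if key idx < bs then some (idx, key idx) else some (bi, bs)
      else best)
    none

def pvGood (key : Nat → Nat) (P : Nat → Bool) (xs : List Nat) : Option (Nat × Nat) → Prop
  | none => ∀ j ∈ xs, P j = false
  | some (i, s) => s = key i ∧ i ∈ xs ∧ P i = true ∧ ∀ j ∈ xs, P j = true → j ≠ i → pvLex key i j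

theorem pvScanGen_good (key : Nat → Nat) (P : Nat → Bool) (xs : List Nat)
    (hx : xs.Pairwise (· < ·)) : pvGood key P xs (pvScanGen key P xs) := by
  induction xs using List.reverseRecOn with
  | nil => intro j hj; simp at hj
  | append_singleton xs x ih =>
    rw [List.pairwise_append] at hx
    have hxs := hx.1
    have hlt : ∀ j ∈ xs, j < x := fun j hj => hx.2.2 j hj x (by simp)
    have ihg := ih hxs
    unfold pvScanGen at ihg ⊢
    rw [List.foldl_append, List.foldl_cons, List.foldl_nil]
    set b := xs.foldl
      (fun best idx =>
        if P idx = true then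
          match best with
          | none => some (idx, key idx)
          | some (bi, bs) => if key idx < bs then some (idx, key idx) else some (bi, bs)
        else best)
      none with hb
    by_cases hPx : P x = true
    · rw [if_pos hPx]
      match b, ihg with
      | none, ihg =>
        refine ⟨rfl, by simp, hPx, fun j hj hPj hne => ?_⟩
        rcases List.mem_append.mp hj with hj' | hj'
        · exact absurd hPj (by simp [ihg j hj'])
        · simp at hj'; omega
      | some (bi, bs), ihg =>
        obtain ⟨hs, hmem, hPb, hmin⟩ := ihg
        dsimp only
        by_cases hcmp : key x < bs
        · rw [if_pos hcmp]
          refine ⟨rfl, by simp, hPx, fun j hj hPj hne => ?_⟩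
          rcases List.mem_append.mp hj with hj' | hj'
          · by_cases hji : j = bi
            · subst hji; exact Or.inl (by omega)
            · have := hmin j hj' hPj hji
              unfold pvLex at this ⊢; omega
          · simp at hj'; omega
        · rw [if_neg hcmp]
          refine ⟨hs, List.mem_append.mpr (Or.inl hmem), hPb, fun j hj hPj hne => ?_⟩
          rcases List.mem_append.mp hj with hj' | hj'
          · exact hmin j hj' hPj hne
          · simp at hj'; subst hj'
            have hbix : bi < j := hlt bi hmem
            unfold pvLex; omega
    · rw [if_neg hPx]
      match b, ihg with
      | none, ihg =>
        intro j hj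
        rcases List.mem_append.mp hj with hj' | hj'
        · exact ihg j hj'
        · simp at hj'; subst hj'; simpa using hPx
      | some (bi, bs), ihg =>
        obtain ⟨hs, hmem, hPb, hmin⟩ := ihg
        refine ⟨hs, List.mem_append.mpr (Or.inl hmem), hPb, fun j hj hPj hne => ?_⟩
        rcases List.mem_append.mp hj with hj' | hj'
        · exact hmin j hj' hPj hne
        · simp at hj'; subst hj'; exact absurd hPj (by simpa using hPx)

-- the chosen indices coincide
theorem pvChoose_eq (key : Nat → Nat) (P : Nat → Bool) (n : Nat) :
    (match (PySem.List.sorted (List.range n) key false).find? P with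
      | some i => some (i, key i)
      | none => none) = pvScanGen key P (List.range n) := by
  have hperm : (PySem.List.sorted (List.range n) key false).Perm (List.range n) :=
    PySem.List.sorted_perm _ _ _
  have hg := pvScanGen_good key P (List.range n) (List.pairwise_lt_range)
  cases hfind : (PySem.List.sorted (List.range n) key false).find? P with
  | none =>
    have hall : ∀ j ∈ List.range n, P j = false := by
      intro j hj
      have := List.find?_eq_none.mp hfind j (hperm.mem_iff.mpr hj)
      simpa using this
    cases hscan : pvScanGen key P (List.range n) with
    | none => rfl
    | some p =>
      rw [hscan] at hg
      obtain ⟨bi, bs⟩ := p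
      obtain ⟨_, hmem, hPb, _⟩ := hg
      rw [hall bi hmem] at hPb; cases hPb
  | some i =>
    have hmemA : i ∈ List.range n := hperm.mem_iff.mp (List.mem_of_find?_eq_some hfind)
    obtain ⟨hPi, hminA⟩ := pvFind_min key P _ (pvSorted_range_pairwise key n) hfind
    cases hscan : pvScanGen key P (List.range n) with
    | none =>
      rw [hscan] at hg
      rw [hg i hmemA] at hPi; cases hPi
    | some p =>
      rw [hscan] at hg
      obtain ⟨bi, bs⟩ := p
      obtain ⟨hs, hmemB, hPb, hminB⟩ := hg
      have : bi = i := by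
        by_contra hne
        exact pvLex_asymm (hminB i hmemA hPi (fun h => hne h.symm)) (hminA bi (hperm.mem_iff.mpr hmemB) hPb hne)
      subst this
      simp [hs]

-- the per-pair step functions agree
theorem pvStep_eq : pvStepA = pvStepB := by
  funext st p
  obtain ⟨yb, sites⟩ := st
  obtain ⟨si, sj⟩ := p
  unfold pvStepA pvStepB
  simp only
  set key : Nat → Nat := fun t => (yb.getD t []).length with hkey
  set P : Nat → Bool := fun idx =>
    (!(PySem.Set.contains (sites.getD idx PySem.Set.empty) si) &&
     !(PySem.Set.contains (sites.getD idx PySem.Set.empty) sj)) with hP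
  have hloop : ∀ l : List Nat,
      pvLoopA si sj yb sites l =
        match l.find? P with
        | some idx => some (yb.set idx (yb.getD idx [] ++ [(si, sj)]),
            sites.set idx (PySem.Set.update (sites.getD idx PySem.Set.empty) [si, sj]))
        | none => none := by
    intro l
    induction l with
    | nil => rfl
    | cons idx rest ih =>
      rw [List.find?_cons]
      simp only [pvLoopA]
      split
      · rename_i hc
        rw [hP] at *
        simp only [hc]
      · rename_i hc
        rw [hP] at *
        simp only [Bool.not_eq_true] at hc
        simp only [hc, ih]
  have hscan : pvScanB si sj yb sites = pvScanGen key P (List.range yb.length) := by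
    unfold pvScanB pvScanGen
    congr 1
  rw [hloop, hscan, ← pvChoose_eq key P yb.length]
  cases hfind : (PySem.List.sorted (List.range yb.length) key false).find? P with
  | none => rfl
  | some idx => rfl

-- ===== VERDICT (by name: the statement is the Claim_ definition above) =====
theorem SelectSitePairClustersCachedStage_spec : Claim_equal_SelectSitePairClustersCachedStage := by
  intro S init _
  unfold Spec_SelectSitePairClustersCachedStage SelectSitePairClustersCachedStage SelectSitePairClustersCachedStage_alt
  rw [pvStep_eq]
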